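-- pv_equiv track=rewrite | github.com/df7cb/aoc | 2023/13a.py | analyze_v
-- ===== SOURCE A (Python) =====
-- def analyze_v(p, s):
--     lx = len(p[0])
--     ly = len(p)
--     w = min(s, lx - s)
--     for y in range(ly):
--         for dx in range(w):
--             if p[y][s - dx - 1] != p[y][s + dx]:
--                 return False
--     return True
-- ===== SOURCE B (Python) =====
-- def analyze_v(p, s):
--     cols = list(zip(*p))
--     w = min(s, len(p[0]) - s)
--     return all(cols[s - dx - 1] == cols[s + dx] for dx in range(w))
-- ===== Notes on version B (the rewrite author's own statement) =====
-- stated objective: alternative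
-- what changed: B transposes the grid once with zip(*p) into whole columns and compares column pairs cols[s-dx-1] == cols[s+dx] in a single loop over the mirror offset, instead of A's row-major nested per-cell scan.
-- outside the precondition, e.g. on analyze_v(['ab', 'a'], 1): A returns False, B raises IndexError
import Mathlib
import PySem

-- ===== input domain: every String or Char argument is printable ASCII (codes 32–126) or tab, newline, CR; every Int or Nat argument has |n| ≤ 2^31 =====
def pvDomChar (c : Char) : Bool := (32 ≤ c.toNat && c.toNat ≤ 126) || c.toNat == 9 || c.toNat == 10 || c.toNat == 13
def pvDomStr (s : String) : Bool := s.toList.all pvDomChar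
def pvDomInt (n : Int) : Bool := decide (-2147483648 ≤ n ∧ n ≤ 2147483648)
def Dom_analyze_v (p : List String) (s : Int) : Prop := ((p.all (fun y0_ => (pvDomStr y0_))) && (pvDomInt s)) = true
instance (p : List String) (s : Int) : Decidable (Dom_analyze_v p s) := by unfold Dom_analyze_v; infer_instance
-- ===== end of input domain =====

-- B transposes the grid once into whole columns (zip(*p)) and compares column pairs in one
-- loop over the mirror offset, instead of A's row-major nested per-cell scan; objective: alternative.

-- ===== PORT A =====
def analyze_v (p : List String) (s : Int) : Bool :=
  let lx : Int := PySem.Str.len (p.headD "")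
  let ly : Int := p.length
  let w : Int := min s (lx - s)
  (PySem.List.pyRange 0 ly 1).all (fun y =>
    (PySem.List.pyRange 0 w 1).all (fun dx =>
      let row := (PySem.List.pyGet? p y).getD ""
      PySem.Str.pyGet? row (s - dx - 1) == PySem.Str.pyGet? row (s + dx)))

-- ===== PORT B =====
-- port of Python's zip(*rows): the list of columns, truncated to the shortest row
def pvZipStar (rows : List (List Char)) : List (List Char) :=
  let n := ((rows.map List.length).min?).getD 0
  (List.range n).map (fun i => rows.map (fun r => r.getD i ' '))

def analyze_v_alt (p : List String) (s : Int) : Bool :=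
  let cols := pvZipStar (p.map String.toList)
  let w : Int := min s (PySem.Str.len (p.headD "") - s)
  (PySem.List.pyRange 0 w 1).all (fun dx =>
    PySem.List.pyGet? cols (s - dx - 1) == PySem.List.pyGet? cols (s + dx))

-- ===== PRECONDITION & SPEC =====
-- Pre_ excludes the empty grid (A raises IndexError on p[0]) and, when the mirror width w is
-- positive, ragged grids having a row shorter than s+w: there A either raises IndexError or
-- returns an early False that depends on its row-major scan order, while B raises or compares
-- truncated columns.
def Pre_analyze_v (p : List String) (s : Int) : Prop :=
  p ≠ [] ∧ (min s (PySem.Str.len (p.headD "") - s) ≤ 0 ∨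
    ∀ r ∈ p, s + min s (PySem.Str.len (p.headD "") - s) ≤ PySem.Str.len r)
instance (p : List String) (s : Int) : Decidable (Pre_analyze_v p s) := by
  unfold Pre_analyze_v; infer_instance

def pvWitness_analyze_v : List String × Int := (["abba", "cddc"], 2)

def Spec_analyze_v (p : List String) (s : Int) (out : Bool) : Prop := out = analyze_v_alt p s
instance (p : List String) (s : Int) (out : Bool) : Decidable (Spec_analyze_v p s out) := by unfold Spec_analyze_v; infer_instance

-- ===== CLAIM (what is proved, stated in full; the proofs are below) =====
def Claim_equal_analyze_v : Prop := ∀ (p : List String) (s : Int), Dom_analyze_v p s → Pre_analyze_v p s → Spec_analyze_v p s (analyze_v p s)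

-- ===== LEMMAS AND PROOFS =====

theorem analyze_v_equal (p : List String) (s : Int) (hpre : Pre_analyze_v p s) :
    analyze_v p s = analyze_v_alt p s := by
  obtain ⟨hne, hrect⟩ := hpre
  set lx : Int := PySem.Str.len (p.headD "") with hlx
  set w : Int := min s (lx - s) with hw
  by_cases hw0 : w ≤ 0
  · unfold analyze_v analyze_v_alt
    simp only [← hlx, ← hw, PySem.List.pyRange_one_eq_nil hw0, List.all_nil,
      List.all_eq_true]
    intro x _; trivial
  · replace hw0 : 0 < w := by omega
    rcases hrect with h | hrect
    · omega
    have hsw_lx : s + w ≤ lx := by omega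
    set L := ((p.map String.toList).map List.length) with hL
    have hLne : L ≠ [] := by simp [hL, hne]
    obtain ⟨m, hm⟩ : ∃ m, L.min? = some m := by
      cases h : L.min? with
      | none => exact absurd (List.min?_eq_none_iff.mp h) hLne
      | some m => exact ⟨m, rfl⟩
    have hmmem := List.min?_mem hm
    have hn : (s + w).toNat ≤ m := by
      simp only [hL, List.map_map, List.mem_map, Function.comp] at hmmem
      obtain ⟨r, hr, hrm⟩ := hmmem
      have := hrect r hr
      simp only [PySem.Str.len] at this
      omega
    have hws : w ≤ s := by rw [hw]; exact min_le_left _ _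
    -- index bounds for a mirror offset dx
    have hb : ∀ dx : Int, 0 ≤ dx → dx < w →
        0 ≤ s - dx - 1 ∧ s - dx - 1 < s + w ∧ 0 ≤ s + dx ∧ s + dx < s + w := by
      intro dx h0 h1; omega
    -- a single cell comparison, for a row r of the grid
    have cell_iff : ∀ (dx : Int), 0 ≤ dx → dx < w → ∀ r : String, r ∈ p →
        ((PySem.Str.pyGet? r (s - dx - 1) == PySem.Str.pyGet? r (s + dx)) = true ↔
          r.toList.getD (s - dx - 1).toNat ' ' = r.toList.getD (s + dx).toNat ' ') := by
      intro dx h0 h1 r hr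
      obtain ⟨hi0, hi1, hj0, hj1⟩ := hb dx h0 h1
      have hlen : s + w ≤ (r.toList.length : Int) := by
        have := hrect r hr; simpa [PySem.Str.len] using this
      have hi : s - dx - 1 < (r.toList.length : Int) := by omega
      have hj : s + dx < (r.toList.length : Int) := by omega
      simp only [PySem.Str.pyGet?, PySem.Chars.pyGet?,
        PySem.List.pyGet?_eq_some_getElem r.toList hi0 hi,
        PySem.List.pyGet?_eq_some_getElem r.toList hj0 hj]
      simp only [beq_iff_eq, Option.some.injEq]
      rw [List.getD_eq_getElem _ _ (show (s - dx - 1).toNat < r.toList.length by omega),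
        List.getD_eq_getElem _ _ (show (s + dx).toNat < r.toList.length by omega)]
    -- a single column comparison in B
    have col_iff : ∀ (dx : Int), 0 ≤ dx → dx < w →
        ((PySem.List.pyGet? ((List.range m).map
            (fun i => (p.map String.toList).map (fun r => r.getD i ' '))) (s - dx - 1) ==
          PySem.List.pyGet? ((List.range m).map
            (fun i => (p.map String.toList).map (fun r => r.getD i ' '))) (s + dx)) = true ↔
          ∀ r : String, r ∈ p →
            r.toList.getD (s - dx - 1).toNat ' ' = r.toList.getD (s + dx).toNat ' ') := by
      intro dx h0 h1
      obtain ⟨hi0, hi1, hj0, hj1⟩ := hb dx h0 h1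
      have hlenc : ((List.range m).map
          (fun i => (p.map String.toList).map (fun r => r.getD i ' '))).length = m := by simp
      have hi : s - dx - 1 < (m : Int) := by omega
      have hj : s + dx < (m : Int) := by omega
      rw [PySem.List.pyGet?_eq_some_getElem _ hi0 (by rw [hlenc]; exact_mod_cast hi),
        PySem.List.pyGet?_eq_some_getElem _ hj0 (by rw [hlenc]; exact_mod_cast hj)]
      simp only [List.getElem_map, List.getElem_range, beq_iff_eq, Option.some.injEq,
        List.map_map, List.map_inj_left, Function.comp]
    rw [Bool.eq_iff_iff]
    unfold analyze_v analyze_v_alt pvZipStar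
    simp only [← hlx, ← hw, ← hL, hm, Option.getD_some, List.all_eq_true,
      PySem.List.mem_pyRange_one]
    constructor
    · intro hA dx hdx
      obtain ⟨h0, h1⟩ := hdx
      rw [col_iff dx h0 h1]
      intro r hr
      obtain ⟨y, hy, rfl⟩ := List.mem_iff_getElem.mp hr
      have hAy := hA (y : Int) ⟨by positivity, by exact_mod_cast hy⟩ dx ⟨h0, h1⟩
      rw [PySem.List.pyGet?_eq_some_getElem p (by positivity) (by exact_mod_cast hy),
        Option.getD_some] at hAy
      simp only [Int.toNat_natCast] at hAy ⊢
      exact (cell_iff dx h0 h1 _ hr).mp (by simpa using hAy)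
    · intro hB y hy dx hdx
      obtain ⟨hy0, hy1⟩ := hy
      obtain ⟨h0, h1⟩ := hdx
      have hylt : y.toNat < p.length := by omega
      rw [PySem.List.pyGet?_eq_some_getElem p hy0 hy1, Option.getD_some]
      exact (cell_iff dx h0 h1 _ (p.getElem_mem hylt)).mpr
        (((col_iff dx h0 h1).mp (hB dx ⟨h0, h1⟩)) _ (p.getElem_mem hylt))

-- ===== VERDICT (by name: the statement is the Claim_ definition above) =====
theorem analyze_v_spec : Claim_equal_analyze_v := by
  intro p s _ hpre
  unfold Spec_analyze_v
  exact analyze_v_equal p s hpre
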